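-- pv_equiv track=rewrite | github.com/SUNYEOP/PIPO_DP | prep_util/vecbool.py | LUT_to_TFT_v
-- ===== SOURCE A (Python) =====
-- log2 = lambda x: 0 if x==1 else 1+log2(x>>1) # Return integer part of log_2(x)
--
-- def LUT_to_TFT_v(LUT, outbit = None):
-- 	"""
-- 	Parameters:													Returns:
-- 	-----------													--------
-- 	LUT:		Look up table of Sbox // list of integer		TFT_v:		vector of Truth-False Table(bit-wise) of coordinate LUT
-- 	outbit: 	if Sbox is not n-bit to n-bit Sbox
--
-- 	Parameter Usage or Example:
-- 	-----------
-- 	3 bit LUT S3 of PIPO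
-- 	S3 = [4, 7, 5, 0, 3, 2, 1, 6]
--
-- 			  --0---1---2----
-- 	S3[7]=6	  |	0	1	1	|
-- 	S3[6]=1	  |	1	0	0	|
-- 	S3[5]=2	  |	0	1	0	|			==>		Output	=	[i-th column value]
-- 	S3[4]=3	  |	1	1	0	|							=	[0b 01010110 ,0b 10110010, 0b 10000111]
-- 	S3[3]=0	  |	0	0	0	|
-- 	S3[2]=5	  |	1	0	1	|
-- 	S3[1]=7	  |	1	1	1	|
-- 	S3[0]=4	  |	0	0	1	|
--  			  ----------------
-- 	"""
-- 	n = log2(len(LUT)) if not outbit else outbit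
-- 	mask = [1<<x for x in range(n)]
--
-- 	TFT_v = [0 for x in range(n)]
-- 	for value in reversed(LUT):
-- 		for i in range(n):
-- 			TFT_v[i] <<=1
-- 			if value&mask[i]:
-- 				TFT_v[i] +=1
-- 	return TFT_v
-- ===== SOURCE B (Python) =====
-- log2 = lambda x: 0 if x==1 else 1+log2(x>>1) # Return integer part of log_2(x)
--
-- def LUT_to_TFT_v(LUT, outbit = None):
--     # Build each truth-table column independently: LUT[j]'s i-th bit lands at
--     # positional weight 2**j, instead of one reverse pass shifting all columns.
--     n = log2(len(LUT)) if not outbit else outbit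
--     return [sum(((value >> i) & 1) << j for j, value in enumerate(LUT)) for i in range(n)]
-- ===== Notes on version B (the rewrite author's own statement) =====
-- stated objective: simpler
-- what changed: Interchanges the loop nesting: instead of A's reverse pass over LUT that left-shifts and increments all n columns together in a mutable array, B builds each column independently as one comprehension summing ((value >> i) & 1) << j over enumerate(LUT).
import Mathlib
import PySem

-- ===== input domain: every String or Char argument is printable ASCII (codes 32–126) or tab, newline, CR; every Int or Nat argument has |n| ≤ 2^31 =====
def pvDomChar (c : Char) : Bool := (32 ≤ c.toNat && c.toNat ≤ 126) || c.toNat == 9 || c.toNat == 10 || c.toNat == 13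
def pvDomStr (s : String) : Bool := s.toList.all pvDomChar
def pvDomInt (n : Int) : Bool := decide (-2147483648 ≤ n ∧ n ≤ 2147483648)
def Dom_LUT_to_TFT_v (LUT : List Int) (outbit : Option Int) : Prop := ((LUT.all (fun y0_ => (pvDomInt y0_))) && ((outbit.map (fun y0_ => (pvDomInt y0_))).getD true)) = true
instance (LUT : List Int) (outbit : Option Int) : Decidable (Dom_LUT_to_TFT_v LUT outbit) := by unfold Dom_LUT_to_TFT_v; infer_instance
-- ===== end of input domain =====

-- B builds each truth-table column independently as a positional sum over enumerate(LUT)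
-- (outer loop over bits, inner forward pass), instead of A's single reverse pass that
-- left-shifts all columns together; objective: simpler.

-- ===== PORT A =====
-- log2 = lambda x: 0 if x==1 else 1+log2(x>>1); the 'x ≤ 1' guard only makes it total
-- (Python's log2 diverges at x = 0, an input excluded by Pre_).
def log2A : Nat → Int
  | x => if x ≤ 1 then 0 else 1 + log2A (x / 2)
  decreasing_by omega

def LUT_to_TFT_v (LUT : List Int) (outbit : Option Int) : List Int :=
  let n : Int := match outbit with
    | none => log2A LUT.length
    | some o => if o = 0 then log2A LUT.length else o
  let nn : Nat := n.toNat
  let mask : List Int := (List.range nn).map (fun (x : Nat) => (1 : Int) <<< x)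
  let TFT0 : List Int := (List.range nn).map (fun _ => (0 : Int))
  LUT.reverse.foldl (fun TFT value =>
    (List.range nn).foldl (fun T i =>
      let t := (T.getD i 0) <<< (1 : Nat)
      T.set i (if PySem.Int.band value (mask.getD i 0) ≠ 0 then t + 1 else t)) TFT) TFT0

-- ===== PORT B =====
def LUT_to_TFT_v_alt (LUT : List Int) (outbit : Option Int) : List Int :=
  let n : Int := match outbit with
    | none => log2A LUT.length
    | some o => if o = 0 then log2A LUT.length else o
  (List.range n.toNat).map (fun (i : Nat) =>
    (PySem.List.enumerate LUT 0).foldl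
      (fun (acc : Int) (jv : Int × Int) => acc + ((PySem.Int.band (jv.2 >>> i) 1) <<< jv.1.toNat)) 0)

-- ===== PRECONDITION & SPEC =====
-- Pre_ excludes only LUT = [] with outbit falsy (None or 0), where Python A's log2(0)
-- recurses forever (RecursionError); A returns on every other input.
def Pre_LUT_to_TFT_v (LUT : List Int) (outbit : Option Int) : Prop :=
  (outbit = none ∨ outbit = some 0) → LUT ≠ []
instance (LUT : List Int) (outbit : Option Int) : Decidable (Pre_LUT_to_TFT_v LUT outbit) := by
  unfold Pre_LUT_to_TFT_v; infer_instance
def pvWitness_LUT_to_TFT_v : List Int × Option Int := ([4, 7, 5, 0, 3, 2, 1, 6], none)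

def Spec_LUT_to_TFT_v (LUT : List Int) (outbit : Option Int) (out : List Int) : Prop := out = LUT_to_TFT_v_alt LUT outbit
instance (LUT : List Int) (outbit : Option Int) (out : List Int) : Decidable (Spec_LUT_to_TFT_v LUT outbit out) := by unfold Spec_LUT_to_TFT_v; infer_instance

-- ===== CLAIM (what is proved, stated in full; the proofs are below) =====
def Claim_equal_LUT_to_TFT_v : Prop := ∀ (LUT : List Int) (outbit : Option Int), Dom_LUT_to_TFT_v LUT outbit → Pre_LUT_to_TFT_v LUT outbit → Spec_LUT_to_TFT_v LUT outbit (LUT_to_TFT_v LUT outbit)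

-- ===== LEMMAS AND PROOFS =====

-- the i-th bit of v, Python style: (v >> i) & 1
def pvBit (k : Nat) (v : Int) : Int := PySem.Int.band (v >>> k) 1

theorem band_negSucc_nat (m b : Nat) :
    PySem.Int.band (Int.negSucc m) (b : Int) = ((b - (b &&& m) : Nat) : Int) := by
  simp [PySem.Int.band]

theorem pvBit_zero_or_one (k : Nat) (v : Int) : pvBit k v = 0 ∨ pvBit k v = 1 := by
  unfold pvBit
  cases v with
  | ofNat m =>
    have h := PySem.Int.band_natCast (m >>> k) 1
    simp only [Nat.cast_one] at h
    rw [Int.ofNat_eq_natCast, show ((m : Int)) >>> k = ((m >>> k : Nat) : Int) from rfl,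
      h, Nat.and_one_is_mod]
    omega
  | negSucc m =>
    have h := band_negSucc_nat (m >>> k) 1
    simp only [Nat.cast_one] at h
    rw [show (Int.negSucc m) >>> k = Int.negSucc (m >>> k) from rfl, h]
    omega

theorem band_two_pow_ne_iff (v : Int) (k : Nat) :
    PySem.Int.band v ((1 : Int) <<< k) ≠ 0 ↔ pvBit k v = 1 := by
  have hpos : 0 < 2 ^ k := Nat.two_pow_pos k
  have hp : ((1 : Int) <<< k) = (((2 : Nat) ^ k : Nat) : Int) := by
    rw [Int.shiftLeft_eq]; push_cast; ring
  rw [hp]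
  cases v with
  | ofNat m =>
    rw [Int.ofNat_eq_natCast, PySem.Int.band_natCast m (2 ^ k)]
    have h2 : pvBit k ((m : Int)) = ((m >>> k &&& 1 : Nat) : Int) := by
      unfold pvBit
      have h := PySem.Int.band_natCast (m >>> k) 1
      simp only [Nat.cast_one] at h
      rw [show ((m : Int)) >>> k = ((m >>> k : Nat) : Int) from rfl, h]
    rw [h2, Nat.and_two_pow, Nat.and_one_is_mod, Nat.shiftRight_eq_div_pow,
      Nat.testBit_eq_decide_div_mod_eq]
    by_cases h : m / 2 ^ k % 2 = 1 <;>
      simp only [h, decide_true, decide_false, Bool.toNat_true, Bool.toNat_false,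
        one_mul, zero_mul] <;> omega
  | negSucc m =>
    rw [band_negSucc_nat m (2 ^ k)]
    have h2 : pvBit k (Int.negSucc m) = ((1 - (1 &&& (m >>> k)) : Nat) : Int) := by
      unfold pvBit
      have h := band_negSucc_nat (m >>> k) 1
      simp only [Nat.cast_one] at h
      rw [show (Int.negSucc m) >>> k = Int.negSucc (m >>> k) from rfl, h]
    rw [h2, Nat.and_comm (2 ^ k) m, Nat.and_comm 1 (m >>> k),
      Nat.and_two_pow, Nat.and_one_is_mod, Nat.shiftRight_eq_div_pow,
      Nat.testBit_eq_decide_div_mod_eq]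
    by_cases h : m / 2 ^ k % 2 = 1 <;>
      simp only [h, decide_true, decide_false, Bool.toNat_true, Bool.toNat_false,
        one_mul, zero_mul] <;> omega

theorem getD_set_zero (l : List Int) (i k : Nat) (a : Int) :
    (l.set i a).getD k 0 = if i = k ∧ i < l.length then a else l.getD k 0 := by
  rw [List.getD_eq_getElem?_getD, List.getD_eq_getElem?_getD, List.getElem?_set]
  by_cases h1 : i = k
  · subst h1
    by_cases h2 : i < l.length
    · rw [if_pos rfl, if_pos h2, if_pos ⟨rfl, h2⟩]; rfl
    · rw [if_pos rfl, if_neg h2, if_neg (by tauto)]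
      have : l[i]? = none := List.getElem?_eq_none (by omega)
      rw [this]
  · rw [if_neg h1, if_neg (by tauto)]

-- one pass of A's inner loop (the range-nn fold of set-at-i) acts pointwise
theorem inner_fold_getD (g : Nat → Int → Int) :
    ∀ (nn : Nat) (T : List Int), nn ≤ T.length →
    ((List.range nn).foldl (fun T i => T.set i (g i (T.getD i 0))) T).length = T.length ∧
    ∀ k, ((List.range nn).foldl (fun T i => T.set i (g i (T.getD i 0))) T).getD k 0 =
      if k < nn then g k (T.getD k 0) else T.getD k 0 := by
  intro nn
  induction nn with
  | zero => intro T _; simp [List.range_zero]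
  | succ nn ih =>
    intro T h
    obtain ⟨hl, hg⟩ := ih T (by omega)
    rw [List.range_succ, List.foldl_append, List.foldl_cons, List.foldl_nil]
    have hnn : ((List.range nn).foldl (fun T i => T.set i (g i (T.getD i 0))) T).getD nn 0
        = T.getD nn 0 := by rw [hg]; simp
    refine ⟨?_, fun k => ?_⟩
    · rw [List.length_set, hl]
    · rw [getD_set_zero, hnn, hg, hl]
      by_cases h1 : nn = k
      · subst h1
        rw [if_pos ⟨rfl, by omega⟩, if_pos (by omega)]
      · rw [if_neg (by tauto)]
        by_cases h2 : k < nn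
        · rw [if_pos h2, if_pos (by omega)]
        · rw [if_neg h2, if_neg (by omega)]

-- A's outer fold, column by column
theorem outer_fold_getD (g : Int → Nat → Int → Int) (R : List Int) (nn : Nat) :
    ∀ (T : List Int), T.length = nn →
    ((R.foldl (fun T value => (List.range nn).foldl
        (fun T i => T.set i (g value i (T.getD i 0))) T) T).length = nn ∧
     ∀ k, k < nn → (R.foldl (fun T value => (List.range nn).foldl
        (fun T i => T.set i (g value i (T.getD i 0))) T) T).getD k 0 =
          R.foldl (fun a value => g value k a) (T.getD k 0)) := by
  induction R with
  | nil => intro T h; exact ⟨h, fun _ _ => rfl⟩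
  | cons v R ih =>
    intro T h
    obtain ⟨hl, hg⟩ := inner_fold_getD (g v) nn T (by omega)
    obtain ⟨hl', hg'⟩ := ih _ (by rw [hl, h])
    refine ⟨by simpa only [List.foldl_cons] using hl', fun k hk => ?_⟩
    simp only [List.foldl_cons]
    rw [hg' k hk, hg k, if_pos hk]

-- B's positional sum via enumerate equals the Horner foldr
theorem enum_sum_eq_foldr (k : Nat) (L : List Int) :
    ∀ (s : Nat) (a : Int),
      (PySem.List.enumerate L (s : Int)).foldl
        (fun (acc : Int) (jv : Int × Int) => acc + ((PySem.Int.band (jv.2 >>> k) 1) <<< jv.1.toNat)) a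
      = a + (L.foldr (fun v r => 2 * r + pvBit k v) 0) * 2 ^ s := by
  induction L with
  | nil => intro s a; simp [PySem.List.enumerate_nil]
  | cons x xs ih =>
    intro s a
    rw [PySem.List.enumerate_cons, List.foldl_cons,
      show ((s : Int) + 1) = (((s + 1 : Nat)) : Int) by push_cast; ring, ih (s + 1)]
    simp only [List.foldr_cons, Int.toNat_natCast, Int.shiftLeft_eq]
    show a + pvBit k x * 2 ^ s + _ = _
    ring

theorem col_eq (k : Nat) (L : List Int) :
    L.reverse.foldl
      (fun (a v : Int) => if PySem.Int.band v ((1 : Int) <<< k) ≠ 0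
        then (a <<< (1 : Nat)) + 1 else a <<< (1 : Nat)) 0
    = (PySem.List.enumerate L 0).foldl
        (fun (acc : Int) (jv : Int × Int) => acc + ((PySem.Int.band (jv.2 >>> k) 1) <<< jv.1.toNat)) 0 := by
  have hf : (fun (a v : Int) =>
      if PySem.Int.band v ((1 : Int) <<< k) ≠ 0 then (a <<< (1 : Nat)) + 1 else a <<< (1 : Nat))
      = fun a v => 2 * a + pvBit k v := by
    funext a v
    have hs : a <<< (1 : Nat) = 2 * a := by rw [Int.shiftLeft_eq]; ring
    by_cases h : PySem.Int.band v ((1 : Int) <<< k) ≠ 0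
    · rw [if_pos h, (band_two_pow_ne_iff v k).mp h, hs]
    · rcases pvBit_zero_or_one k v with h0 | h1
      · rw [if_neg h, h0, hs]; ring
      · exact absurd ((band_two_pow_ne_iff v k).mpr h1) h
  have he := enum_sum_eq_foldr k L 0 0
  simp only [Nat.cast_zero, pow_zero, mul_one, zero_add] at he
  rw [hf, List.foldl_reverse, ← he]

-- both ports, with the common bit count abstracted as nn
theorem ports_core (L : List Int) (nn : Nat) :
    L.reverse.foldl (fun TFT value =>
      (List.range nn).foldl (fun T i =>
        T.set i (if PySem.Int.band value
            (((List.range nn).map (fun (x : Nat) => (1 : Int) <<< x)).getD i 0) ≠ 0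
          then (T.getD i 0 <<< (1 : Nat)) + 1 else T.getD i 0 <<< (1 : Nat))) TFT)
      ((List.range nn).map (fun _ => (0 : Int)))
    = (List.range nn).map (fun (i : Nat) =>
        (PySem.List.enumerate L 0).foldl
          (fun (acc : Int) (jv : Int × Int) => acc + ((PySem.Int.band (jv.2 >>> i) 1) <<< jv.1.toNat)) 0) := by
  obtain ⟨hl, hg⟩ := outer_fold_getD
    (fun value i t => if PySem.Int.band value
        (((List.range nn).map (fun (x : Nat) => (1 : Int) <<< x)).getD i 0) ≠ 0
      then (t <<< (1 : Nat)) + 1 else t <<< (1 : Nat))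
    L.reverse nn ((List.range nn).map (fun _ => (0 : Int))) (by simp)
  apply List.ext_getElem (by rw [hl]; simp)
  intro k hk1 hk2
  have hkn : k < nn := by rwa [hl] at hk1
  have hmk : ((List.range nn).map (fun (x : Nat) => (1 : Int) <<< x)).getD k 0
      = (1 : Int) <<< k := by
    rw [List.getD_eq_getElem _ 0 (by simpa using hkn)]
    simp
  have h0 : ((List.range nn).map (fun _ => (0 : Int))).getD k 0 = 0 := by
    rw [List.getD_eq_getElem _ 0 (by simpa using hkn)]
    simp
  calc _ = ((L.reverse.foldl (fun TFT value =>
            (List.range nn).foldl (fun T i =>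
              T.set i (if PySem.Int.band value
                  (((List.range nn).map (fun (x : Nat) => (1 : Int) <<< x)).getD i 0) ≠ 0
                then (T.getD i 0 <<< (1 : Nat)) + 1 else T.getD i 0 <<< (1 : Nat))) TFT)
            ((List.range nn).map (fun _ => (0 : Int))))).getD k 0 :=
          (List.getD_eq_getElem _ 0 hk1).symm
    _ = _ := by
          rw [hg k hkn, h0, hmk, col_eq k L]
          simp

-- ===== VERDICT (by name: the statement is the Claim_ definition above) =====
theorem LUT_to_TFT_v_spec : Claim_equal_LUT_to_TFT_v := by
  intro LUT outbit _ _
  show LUT_to_TFT_v LUT outbit = LUT_to_TFT_v_alt LUT outbit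
  unfold LUT_to_TFT_v LUT_to_TFT_v_alt
  exact ports_core LUT _
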